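-- pv_equiv track=rewrite | github.com/Mau8877/FlowRoad-Backend-IA | app/services/diagram_ai_auto_repairer.py | _resolve_department_id_for_auto_final
-- ===== SOURCE A (Python) =====
-- from typing import Any
--
-- def _resolve_department_id_for_auto_final(
--
--     nodes: list[dict[str, Any]],
-- ) -> str:
--     for node in reversed(nodes):
--         if not isinstance(node, dict):
--             continue
--
--         department_id = str(node.get("department_id") or "").strip()
--
--         if department_id:
--             return department_id
--
--     return ""
-- ===== SOURCE B (Python) =====
-- from typing import Any
--
-- def _resolve_department_id_for_auto_final(
--     nodes: list[dict[str, Any]],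
-- ) -> str:
--     result = ""
--     for node in nodes:
--         if not isinstance(node, dict):
--             continue
--         department_id = str(node.get("department_id") or "").strip()
--         if department_id:
--             result = department_id
--     return result
-- ===== Notes on version B (the rewrite author's own statement) =====
-- stated objective: alternative
-- what changed: Replaces the reverse-order scan with early return by a forward fold that threads a 'last seen nonempty' accumulator over the whole list.
import Mathlib
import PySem

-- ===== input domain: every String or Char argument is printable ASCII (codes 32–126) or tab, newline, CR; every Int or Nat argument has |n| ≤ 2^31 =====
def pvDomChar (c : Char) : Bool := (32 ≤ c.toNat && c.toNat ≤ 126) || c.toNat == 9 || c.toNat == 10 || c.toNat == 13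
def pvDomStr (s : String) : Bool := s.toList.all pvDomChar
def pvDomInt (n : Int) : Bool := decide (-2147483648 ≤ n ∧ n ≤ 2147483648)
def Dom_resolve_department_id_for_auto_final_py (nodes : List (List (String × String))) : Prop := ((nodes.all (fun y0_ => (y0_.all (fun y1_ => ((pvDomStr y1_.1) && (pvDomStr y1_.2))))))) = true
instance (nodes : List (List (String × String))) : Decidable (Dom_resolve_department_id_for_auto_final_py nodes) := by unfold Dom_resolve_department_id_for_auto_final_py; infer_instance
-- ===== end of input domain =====

-- B replaces A's reverse scan with early return by a forward fold threading a
-- 'last seen nonempty' accumulator (alternative decomposition, same cost).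
-- All nodes are dicts under the type convention, so A's isinstance guard is vacuous.

-- ===== PORT A =====
-- the body of A's `for node in reversed(nodes)` loop with early return:
-- department_id = str(node.get("department_id") or "").strip()  (on strings,
-- `str(x or "")` is the value with None replaced by "", i.e. getD _ "")
def pvScanA : List (List (String × String)) → String
  | [] => ""
  | node :: rest =>
    let department_id := PySem.Str.strip ((PySem.Dict.ofList node).getD "department_id" "")
    if department_id ≠ "" then department_id else pvScanA rest

def resolve_department_id_for_auto_final_py (nodes : List (List (String × String))) : String :=
  pvScanA nodes.reverse

-- ===== PORT B =====
def resolve_department_id_for_auto_final_py_alt (nodes : List (List (String × String))) : String :=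
  nodes.foldl (fun result node =>
    let department_id := PySem.Str.strip ((PySem.Dict.ofList node).getD "department_id" "")
    if department_id ≠ "" then department_id else result) ""

-- ===== PRECONDITION & SPEC =====
def Spec_resolve_department_id_for_auto_final_py (nodes : List (List (String × String))) (out : String) : Prop := out = resolve_department_id_for_auto_final_py_alt nodes
instance (nodes : List (List (String × String))) (out : String) : Decidable (Spec_resolve_department_id_for_auto_final_py nodes out) := by unfold Spec_resolve_department_id_for_auto_final_py; infer_instance

-- ===== CLAIM (what is proved, stated in full; the proofs are below) =====
def Claim_equal_resolve_department_id_for_auto_final_py : Prop := ∀ (nodes : List (List (String × String))), Dom_resolve_department_id_for_auto_final_py nodes → Spec_resolve_department_id_for_auto_final_py nodes (resolve_department_id_for_auto_final_py nodes)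

-- ===== LEMMAS AND PROOFS =====

theorem pvScanA_append (a b : List (List (String × String))) :
    pvScanA (a ++ b) = if pvScanA a ≠ "" then pvScanA a else pvScanA b := by
  induction a with
  | nil => simp [pvScanA]
  | cons x xs ih =>
    simp only [List.cons_append, pvScanA, ih]
    split_ifs <;> simp_all

theorem pvFold_eq_scan (l : List (List (String × String))) (acc : String) :
    l.foldl (fun result node =>
      let department_id := PySem.Str.strip ((PySem.Dict.ofList node).getD "department_id" "")
      if department_id ≠ "" then department_id else result) acc
    = if pvScanA l.reverse ≠ "" then pvScanA l.reverse else acc := by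
  induction l generalizing acc with
  | nil => simp [pvScanA]
  | cons x xs ih =>
    simp only [List.foldl_cons, ih, List.reverse_cons, pvScanA_append, pvScanA]
    split_ifs <;> simp_all

-- ===== VERDICT (by name: the statement is the Claim_ definition above) =====
theorem resolve_department_id_for_auto_final_py_spec : Claim_equal_resolve_department_id_for_auto_final_py := by
  intro nodes _
  unfold Spec_resolve_department_id_for_auto_final_py resolve_department_id_for_auto_final_py
    resolve_department_id_for_auto_final_py_alt
  rw [pvFold_eq_scan]
  split_ifs <;> simp_all
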